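-- pv_equiv track=rewrite | github.com/tjsgh531/codingtest_perfect_guide_with_backjoon | 8. 분할 정복/종이의 개수/solution1.py | check_graph
-- ===== SOURCE A (Python) =====
-- def check_graph(sub_graph):
--     if len(sub_graph) == 1:
--         return True
--
--     number = sub_graph[0][0]
--     for row in sub_graph:
--         for item in row:
--             if number != item:
--                 return False
--     return True
-- ===== SOURCE B (Python) =====
-- def check_graph(sub_graph):
--     if len(sub_graph) == 1:
--         return True
--     flat = [item for row in sub_graph for item in row]
--     return min(flat) == max(flat)
-- ===== Notes on version B (the rewrite author's own statement) =====
-- stated objective: alternative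
-- what changed: Instead of comparing every cell against the top-left corner with nested early-exit loops, B flattens the matrix and decides uniformity arithmetically by min(flat) == max(flat), maintaining running extrema rather than a reference-value comparison.
import Mathlib
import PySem

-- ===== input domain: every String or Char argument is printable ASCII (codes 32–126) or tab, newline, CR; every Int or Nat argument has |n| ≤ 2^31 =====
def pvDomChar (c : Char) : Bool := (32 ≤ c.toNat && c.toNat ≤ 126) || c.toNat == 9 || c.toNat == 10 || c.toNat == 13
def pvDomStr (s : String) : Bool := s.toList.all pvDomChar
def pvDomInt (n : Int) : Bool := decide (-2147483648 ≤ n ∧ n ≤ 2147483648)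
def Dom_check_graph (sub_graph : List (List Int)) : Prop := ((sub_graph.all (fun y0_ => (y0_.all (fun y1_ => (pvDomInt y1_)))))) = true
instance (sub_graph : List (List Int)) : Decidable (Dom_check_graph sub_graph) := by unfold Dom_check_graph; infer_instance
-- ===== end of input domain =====

-- B decides uniformity by flattening the matrix and testing min(flat) == max(flat)
-- instead of A's nested early-exit comparison against the top-left corner (alternative; same cost).

-- ===== PORT A =====
-- inner 'for item in row: if number != item: return False'
def pvRowOk (number : Int) : List Int → Bool
  | [] => true
  | item :: rest => if number ≠ item then false else pvRowOk number rest

-- outer 'for row in sub_graph: …; return True'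
def pvRowsOk (number : Int) : List (List Int) → Bool
  | [] => true
  | row :: rest => if pvRowOk number row then pvRowsOk number rest else false

def check_graph (sub_graph : List (List Int)) : Bool :=
  if sub_graph.length = 1 then true
  else
    -- sub_graph[0][0]; total via getD, exact under Pre_check_graph
    let number : Int :=
      (PySem.List.pyGet? ((PySem.List.pyGet? sub_graph 0).getD []) 0).getD 0
    pvRowsOk number sub_graph

-- ===== PORT B =====
def check_graph_alt (sub_graph : List (List Int)) : Bool :=
  if sub_graph.length = 1 then true
  else
    -- flat = [item for row in sub_graph for item in row]
    let flat : List Int := sub_graph.flatMap (fun row => row)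
    -- min(flat) == max(flat); min/max raise ValueError on empty flat (outside Pre_)
    match PySem.List.min? flat (fun x => x), PySem.List.max? flat (fun x => x) with
    | some mn, some mx => mn == mx
    | _, _ => false

-- ===== PRECONDITION & SPEC =====
-- Pre_ excludes exactly the inputs where sub_graph[0][0] raises IndexError in A
-- (the empty matrix, and an empty first row when there is more than one row);
-- on those B either raises too (min of an empty flat list) or returns a value.
def Pre_check_graph (sub_graph : List (List Int)) : Prop :=
  sub_graph ≠ [] ∧ (sub_graph.length = 1 ∨ sub_graph.headD [] ≠ [])
instance (sub_graph : List (List Int)) : Decidable (Pre_check_graph sub_graph) := by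
  unfold Pre_check_graph; infer_instance

def pvWitness_check_graph : List (List Int) := [[1, 1], [1, 1]]

def Spec_check_graph (sub_graph : List (List Int)) (out : Bool) : Prop := out = check_graph_alt sub_graph
instance (sub_graph : List (List Int)) (out : Bool) : Decidable (Spec_check_graph sub_graph out) := by unfold Spec_check_graph; infer_instance

-- ===== CLAIM (what is proved, stated in full; the proofs are below) =====
def Claim_equal_check_graph : Prop := ∀ (sub_graph : List (List Int)), Dom_check_graph sub_graph → Pre_check_graph sub_graph → Spec_check_graph sub_graph (check_graph sub_graph)

-- ===== LEMMAS AND PROOFS =====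

theorem pvRowOk_iff (n : Int) (row : List Int) :
    pvRowOk n row = true ↔ ∀ v ∈ row, v = n := by
  induction row with
  | nil => simp [pvRowOk]
  | cons x xs ih =>
    simp only [pvRowOk]
    split_ifs with h
    · constructor
      · intro hx; cases hx
      · intro hall; exact absurd ((hall x (by simp)).symm) h
    · rw [ih]
      have hx : n = x := not_not.mp h
      constructor
      · intro hall v hv
        rcases List.mem_cons.mp hv with rfl | hv'
        · exact hx.symm
        · exact hall v hv'
      · intro hall v hv; exact hall v (List.mem_cons_of_mem _ hv)

theorem pvRowsOk_iff (n : Int) (g : List (List Int)) :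
    pvRowsOk n g = true ↔ ∀ row ∈ g, ∀ v ∈ row, v = n := by
  induction g with
  | nil => simp [pvRowsOk]
  | cons r rs ih =>
    simp only [pvRowsOk]
    split_ifs with h
    · rw [ih]
      have hr := (pvRowOk_iff n r).mp h
      constructor
      · intro hall row hrow
        rcases List.mem_cons.mp hrow with rfl | h'
        · exact hr
        · exact hall row h'
      · intro hall row hrow; exact hall row (List.mem_cons_of_mem _ hrow)
    · constructor
      · intro hx; cases hx
      · intro hall
        exact absurd ((pvRowOk_iff n r).mpr (hall r (by simp))) h

-- min(flat) == max(flat) over a :: t decides 'every element equals a'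
theorem fold_min_eq_max_iff (a : Int) (t : List Int) :
    (t.foldl min a = t.foldl max a) ↔ ∀ v ∈ a :: t, v = a := by
  constructor
  · intro heq v hv
    have hmin_le_a := (PySem.List.foldl_min_le t a).1
    have ha_le_max := (PySem.List.le_foldl_max t a).1
    rcases List.mem_cons.mp hv with rfl | hv'
    · rfl
    · have h1 := (PySem.List.foldl_min_le t a).2 v hv'
      have h2 := (PySem.List.le_foldl_max t a).2 v hv'
      omega
  · intro hall
    have hmn : t.foldl min a = a := by
      rcases PySem.List.foldl_min_mem t a with h | h
      · exact h
      · exact hall _ (List.mem_cons_of_mem _ h)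
    have hmx : t.foldl max a = a := by
      rcases PySem.List.foldl_max_mem t a with h | h
      · exact h
      · exact hall _ (List.mem_cons_of_mem _ h)
    rw [hmn, hmx]

theorem check_graph_eq_alt (g : List (List Int)) (hne : g ≠ [])
    (hpre : g.length = 1 ∨ g.headD [] ≠ []) : check_graph g = check_graph_alt g := by
  by_cases hl : g.length = 1
  · simp [check_graph, check_graph_alt, hl]
  · obtain ⟨r, rs, rfl⟩ : ∃ r rs, g = r :: rs := by
      cases g with
      | nil => exact absurd rfl hne
      | cons r rs => exact ⟨r, rs, rfl⟩
    have hr : r ≠ [] := by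
      rcases hpre with h1 | h2
      · exact absurd h1 hl
      · simpa using h2
    obtain ⟨a, xs, rfl⟩ : ∃ a xs, r = a :: xs := by
      cases r with
      | nil => exact absurd rfl hr
      | cons a xs => exact ⟨a, xs, rfl⟩
    simp only [check_graph, check_graph_alt, hl, if_false]
    have hnum : (PySem.List.pyGet? ((PySem.List.pyGet? ((a :: xs) :: rs) 0).getD []) 0).getD 0 = a := by
      simp [PySem.List.pyGet?, PySem.List.pyIdx?]
    rw [hnum]
    have hflat : ((a :: xs) :: rs).flatMap (fun row => row) = a :: (xs ++ rs.flatMap (fun row => row)) := by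
      simp
    rw [hflat, PySem.List.min?_id_cons, PySem.List.max?_id_cons]
    have hchar : pvRowsOk a ((a :: xs) :: rs) = true ↔
        ∀ v ∈ a :: (xs ++ rs.flatMap (fun row => row)), v = a := by
      rw [pvRowsOk_iff]
      constructor
      · intro hall v hv
        rcases List.mem_cons.mp hv with rfl | hv'
        · rfl
        · rcases List.mem_append.mp hv' with h | h
          · exact hall (a :: xs) (List.mem_cons_self ..) v (List.mem_cons_of_mem a h)
          · obtain ⟨row, hrow, hvrow⟩ := List.mem_flatMap.mp h
            exact hall row (List.mem_cons_of_mem _ hrow) v hvrow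
      · intro hall row hrow v hv
        rcases List.mem_cons.mp hrow with rfl | hrow'
        · rcases List.mem_cons.mp hv with rfl | h
          · exact hall v (List.mem_cons_self ..)
          · exact hall v (List.mem_cons_of_mem a (List.mem_append_left _ h))
        · exact hall v (List.mem_cons_of_mem a
            (List.mem_append_right _ (List.mem_flatMap.mpr ⟨row, hrow', hv⟩)))
    rcases h : pvRowsOk a ((a :: xs) :: rs) with _ | _
    · have hnot : ¬ ((xs ++ rs.flatMap (fun row => row)).foldl min a
          = (xs ++ rs.flatMap (fun row => row)).foldl max a) := by
        rw [fold_min_eq_max_iff]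
        intro hall
        have := hchar.mpr hall
        rw [h] at this; exact Bool.false_ne_true this
      symm
      rw [beq_eq_false_iff_ne]
      exact hnot
    · have hall := hchar.mp h
      have heq := (fold_min_eq_max_iff a _).mpr hall
      symm
      rw [beq_iff_eq]
      exact heq

-- ===== VERDICT (by name: the statement is the Claim_ definition above) =====
theorem check_graph_spec : Claim_equal_check_graph := by
  intro g _ hpre
  unfold Spec_check_graph
  exact check_graph_eq_alt g hpre.1 hpre.2
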